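-- pv_equiv track=rewrite | github.com/taxijjang/algorithm | 2024kakao/주사위고르기.py | solution
-- ===== SOURCE A (Python) =====
-- from itertools import combinations, product
-- from collections import Counter, defaultdict, OrderedDict
--
-- def solution(dice):
--     total_dice_count = len(dice)
--     get_count = len(dice) // 2
--
--     total_dice_index = [i for i in range(len(dice))]
--     total_dice_combi = list(combinations(total_dice_index, get_count))
--
--     select_dice, win_count = [], 0
--     for a_dice in total_dice_combi:
--         a_dice = list(a_dice)
--         b_dice = get_b_dice(a_dice, total_dice_count)
--         a_dice, win_draw_lose = select_number_at_dice(dice, a_dice, b_dice)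
--
--         if select_dice == []:
--             select_dice = a_dice
--             win_count = win_draw_lose.get("win", 0)
--         else:
--             if win_count < win_draw_lose.get("win", 0):
--                 select_dice = a_dice
--                 win_count = win_draw_lose.get("win", 0)
--
--     select_dice = [i+1 for i in select_dice]
--     return select_dice
--
-- def get_b_dice(a_dice, total_dice_count):
--     return [i for i in range(total_dice_count) if i not in a_dice]
--
-- def select_number_at_dice(dice_list, a_dice, b_dice):
--     a = []
--     for a_dice_index in a_dice:
--         a.append(dice_list[a_dice_index])
--     a_product_list = list(product(*a))
--     a_result = [sum(a) for a in a_product_list]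
--     a_result.sort(reverse=True)
--
--     b = []
--     for b_dice_index in b_dice:
--         b.append(dice_list[b_dice_index])
--     b_product_list = list(product(*b))
--     b_result = [sum(b) for b in b_product_list]
--     b_result.sort(reverse=True)
--
--     win_draw_lose = compare_count(Counter(a_result), Counter(b_result))
--
--     return a_dice, win_draw_lose
--
-- def compare_count(a: Counter, b: Counter):
--     a = OrderedDict(a)
--     b = OrderedDict(b)
--     win_draw_lose = defaultdict(int)
--     for a_key, a_value in a.items():
--         for b_key, b_value in b.items():
--             if a_key > b_key:
--                 win_draw_lose["win"] += b_value * a_value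
--     return win_draw_lose
-- ===== SOURCE B (Python) =====
-- from itertools import combinations
--
--
-- def solution(dice):
--     n = len(dice)
--     k = n // 2
--     best_sel, best_wins = [], -1
--     for a_idx in combinations(range(n), k):
--         b_idx = [i for i in range(n) if i not in a_idx]
--         a_sums = sorted(_sums(dice, a_idx))
--         b_sums = sorted(_sums(dice, b_idx))
--         wins = _count_wins(a_sums, b_sums)
--         if wins > best_wins:
--             best_sel, best_wins = list(a_idx), wins
--     return [i + 1 for i in best_sel]
--
--
-- def _sums(dice, idxs):
--     sums = [0]
--     for i in idxs:
--         sums = [s + f for s in sums for f in dice[i]]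
--     return sums
--
--
-- def _count_wins(a_sorted, b_sorted):
--     # both lists ascending: two-pointer merge count of pairs a > b
--     wins, j, m = 0, 0, len(b_sorted)
--     for a in a_sorted:
--         while j < m and b_sorted[j] < a:
--             j += 1
--         wins += j
--     return wins
-- ===== Notes on version B (the rewrite author's own statement) =====
-- stated objective: alternative
-- what changed: Instead of building all product tuples, rank-sorting them descending and multiplying Counter frequencies in a quadratic double loop over the two counters, B builds the dice sums by an incremental fold and counts wins by sorting both sum lists ascending and doing a single two-pointer merge scan, keeping the first combination with a strictly larger win count exactly like A; intended as asymptotically faster (A timed out at the size a timing run needed, so the ratio is unconfirmed).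
import Mathlib
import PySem

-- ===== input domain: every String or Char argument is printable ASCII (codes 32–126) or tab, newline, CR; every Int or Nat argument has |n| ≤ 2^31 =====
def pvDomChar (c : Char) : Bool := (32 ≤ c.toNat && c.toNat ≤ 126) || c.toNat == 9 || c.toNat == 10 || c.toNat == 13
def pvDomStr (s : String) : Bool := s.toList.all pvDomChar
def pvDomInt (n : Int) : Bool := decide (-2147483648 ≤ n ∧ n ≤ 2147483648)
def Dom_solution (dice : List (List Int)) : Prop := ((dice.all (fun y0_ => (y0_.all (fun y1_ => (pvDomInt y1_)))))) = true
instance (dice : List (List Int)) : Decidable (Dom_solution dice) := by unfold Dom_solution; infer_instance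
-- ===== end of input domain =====

-- B replaces A's Counter-times-Counter double loop by sort + two-pointer merge count; return value proved equal.

-- ===== PORT A =====
-- itertools.product(*lists) for lists of int lists
def pvListProduct : List (List Int) → List (List Int)
  | [] => [[]]
  | l :: ls => l.flatMap (fun x => (pvListProduct ls).map (x :: ·))

-- compare_count(a, b): double loop over the two counters' items into a defaultdict(int)
def pvCompareCount (ca cb : PySem.Dict Int Int) : PySem.Dict String Int :=
  ca.items.foldl (fun d p =>
    cb.items.foldl (fun d q =>
      if p.1 > q.1 then d.insert "win" (d.getD "win" 0 + q.2 * p.2) else d) d)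
    PySem.Dict.empty

-- select_number_at_dice(dice_list, a_dice, b_dice)  (dice_list[i] via pyGetD: indices always in range here)
def pvSelectNumber (diceList : List (List Int)) (aDice bDice : List Int) :
    List Int × PySem.Dict String Int :=
  let a := aDice.foldl (fun acc i => acc ++ [PySem.List.pyGetD diceList i []]) []
  let aResult := PySem.List.sorted ((pvListProduct a).map (fun t => t.sum)) (fun x => x) true
  let b := bDice.foldl (fun acc i => acc ++ [PySem.List.pyGetD diceList i []]) []
  let bResult := PySem.List.sorted ((pvListProduct b).map (fun t => t.sum)) (fun x => x) true
  (aDice, pvCompareCount (PySem.Dict.counter aResult) (PySem.Dict.counter bResult))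

def solution (dice : List (List Int)) : List Int :=
  let totalDiceCount : Int := (dice.length : Int)
  let getCount : Nat := dice.length / 2
  let totalDiceIndex := PySem.List.pyRange 0 totalDiceCount 1
  let totalDiceCombi := PySem.List.combinations totalDiceIndex getCount
  let st := totalDiceCombi.foldl
    (fun (st : List Int × Int) aDice =>
      let bDice := (PySem.List.pyRange 0 totalDiceCount 1).filter (fun i => !aDice.contains i)
      let r := pvSelectNumber dice aDice bDice
      let w := r.2.getD "win" 0
      if st.1 = [] then (r.1, w)
      else if st.2 < w then (r.1, w) else st)
    ([], 0)
  st.1.map (· + 1)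

-- ===== PORT B =====
-- _sums(dice, idxs): incremental fold of attainable sums
def pvSums (dice : List (List Int)) (idxs : List Int) : List Int :=
  idxs.foldl (fun sums i => sums.flatMap (fun s => (PySem.List.pyGetD dice i []).map (fun f => s + f))) [0]

-- the inner 'while j < m and b_sorted[j] < a: j += 1'
def pvAdvance (bs : List Int) (a : Int) (j : Nat) : Nat :=
  if h : j < bs.length then
    if bs[j] < a then pvAdvance bs a (j + 1) else j
  else j
termination_by bs.length - j

-- _count_wins(a_sorted, b_sorted): two-pointer merge count
def pvCountWins (aS bS : List Int) : Int :=
  (aS.foldl (fun (st : Int × Nat) a =>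
      let j := pvAdvance bS a st.2
      (st.1 + (j : Int), j)) (0, 0)).1

def solution_alt (dice : List (List Int)) : List Int :=
  let n : Int := (dice.length : Int)
  let k : Nat := dice.length / 2
  let st := (PySem.List.combinations (PySem.List.pyRange 0 n 1) k).foldl
    (fun (st : List Int × Int) aIdx =>
      let bIdx := (PySem.List.pyRange 0 n 1).filter (fun i => !aIdx.contains i)
      let aS := PySem.List.sorted (pvSums dice aIdx) (fun x => x) false
      let bS := PySem.List.sorted (pvSums dice bIdx) (fun x => x) false
      let w := pvCountWins aS bS
      if st.2 < w then (aIdx, w) else st)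
    ([], -1)
  st.1.map (· + 1)

-- ===== PRECONDITION & SPEC =====
def Spec_solution (dice : List (List Int)) (out : List Int) : Prop := out = solution_alt dice
instance (dice : List (List Int)) (out : List Int) : Decidable (Spec_solution dice out) := by unfold Spec_solution; infer_instance

-- ===== CLAIM (what is proved, stated in full; the proofs are below) =====
def Claim_equal_solution : Prop := ∀ (dice : List (List Int)), Dom_solution dice → Spec_solution dice (solution dice)

-- ===== LEMMAS AND PROOFS =====

-- the number of (a, b) pairs with a > b, as both ports' win count reduces to it
def pvPair (as bs : List Int) : Int :=
  (as.map (fun a => (bs.countP (fun b => decide (b < a)) : Int))).sum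

def pvStep (sums die : List Int) : List Int := sums.flatMap (fun s => die.map (fun f => s + f))

theorem pvStep_foldl_nil (L : List (List Int)) : L.foldl pvStep [] = [] := by
  induction L with
  | nil => rfl
  | cons l ls ih => simp [pvStep, ih]

theorem pvStep_foldl_append (L : List (List Int)) (xs ys : List Int) :
    L.foldl pvStep (xs ++ ys) = L.foldl pvStep xs ++ L.foldl pvStep ys := by
  induction L generalizing xs ys with
  | nil => simp
  | cons l ls ih => simp only [List.foldl_cons, pvStep, List.flatMap_append]; exact ih _ _

theorem pvStep_foldl_flatMap (L : List (List Int)) (xs : List Int) :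
    L.foldl pvStep xs = xs.flatMap (fun s => L.foldl pvStep [s]) := by
  induction xs with
  | nil => simp [pvStep_foldl_nil]
  | cons x xs ih =>
      have : (x :: xs) = [x] ++ xs := rfl
      rw [this, pvStep_foldl_append, ih]; simp

theorem pvProduct_sum_shift (L : List (List Int)) (s0 : Int) :
    (pvListProduct L).map (fun t => s0 + t.sum) = L.foldl pvStep [s0] := by
  induction L generalizing s0 with
  | nil => simp [pvListProduct]
  | cons l ls ih =>
      simp only [pvListProduct, List.map_flatMap, List.map_map, List.foldl_cons]
      have hstep : pvStep [s0] l = l.map (fun x => s0 + x) := by simp [pvStep]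
      rw [hstep, pvStep_foldl_flatMap, List.flatMap_map]
      refine List.flatMap_congr (fun x hx => ?_)
      rw [← ih (s0 + x)]
      simp [Function.comp, add_assoc]

theorem pvProduct_sum (L : List (List Int)) :
    (pvListProduct L).map List.sum = L.foldl pvStep [0] := by
  rw [← pvProduct_sum_shift L 0]
  exact List.map_congr_left (fun t _ => (zero_add t.sum).symm)

theorem pvSums_eq (dice : List (List Int)) (idxs : List Int) :
    pvSums dice idxs = (idxs.map (fun i => PySem.List.pyGetD dice i [])).foldl pvStep [0] := by
  rw [List.foldl_map]; rfl

-- ---------- counting lemmas ----------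

theorem pvSum_single (s : List Int) (g : Int → Int) (b : Int) (hs : s.Nodup) (hb : b ∈ s) :
    (s.map (fun k => if k = b then g k else 0)).sum = g b := by
  induction s with
  | nil => cases hb
  | cons x t ih =>
      rcases List.mem_cons.mp hb with rfl | h
      · have hnot : b ∉ t := (List.nodup_cons.mp hs).1
        have hz : (t.map (fun k => if k = b then g k else 0)).sum = 0 := by
          apply List.sum_eq_zero
          intro y hy
          rcases List.mem_map.mp hy with ⟨k, hk, rfl⟩
          have hkb : k ≠ b := fun h => hnot (h ▸ hk)
          simp [hkb]
        simp [hz]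
      · have hx : x ≠ b := fun hxb => (List.nodup_cons.mp hs).1 (hxb ▸ h)
        simp [hx, ih (List.nodup_cons.mp hs).2 h]

theorem pvSum_count_mul (bs s : List Int) (g : Int → Int) (hs : s.Nodup)
    (hsub : ∀ b ∈ bs, b ∈ s) :
    (s.map (fun k => (bs.count k : Int) * g k)).sum = (bs.map g).sum := by
  induction bs with
  | nil => simp
  | cons b bs' ih =>
      have hsub' : ∀ x ∈ bs', x ∈ s := fun x hx => hsub x (List.mem_cons_of_mem _ hx)
      have hsplit : ∀ k : Int, ((b :: bs').count k : Int) * g k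
          = (bs'.count k : Int) * g k + (if k = b then g k else 0) := by
        intro k
        rw [List.count_cons]
        push_cast
        by_cases h : k = b
        · subst h; simp [add_mul]
        · simp [h, Ne.symm h]
      calc (s.map (fun k => ((b :: bs').count k : Int) * g k)).sum
          = (s.map (fun k => (bs'.count k : Int) * g k + (if k = b then g k else 0))).sum := by
            exact congrArg List.sum (List.map_congr_left (fun k _ => hsplit k))
        _ = (s.map (fun k => (bs'.count k : Int) * g k)).sum
            + (s.map (fun k => if k = b then g k else 0)).sum := by
            rw [← List.sum_map_add]
        _ = (bs'.map g).sum + g b := by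
            rw [ih hsub', pvSum_single s g b hs (hsub b List.mem_cons_self)]
        _ = ((b :: bs').map g).sum := by simp [add_comm]

theorem pvSum_ite_count (bs : List Int) (x c : Int) :
    (bs.map (fun b => if b < x then c else 0)).sum
      = (bs.countP (fun b => decide (b < x)) : Int) * c := by
  induction bs with
  | nil => simp
  | cons b t ih =>
      by_cases h : b < x
      · simp only [List.map_cons, List.sum_cons, ih, List.countP_cons, h, decide_true,
          if_true]
        push_cast
        ring
      · simp [h, ih]

-- ---------- the win value of A's counter double loop ----------

theorem pvInner_getD (l : List (Int × Int)) (d : PySem.Dict String Int) (p1 c : Int) :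
    ((l.foldl (fun d q => if p1 > q.1 then d.insert "win" (d.getD "win" 0 + q.2 * c) else d) d).getD "win" 0)
      = d.getD "win" 0 + (l.map (fun q => if q.1 < p1 then q.2 * c else 0)).sum := by
  induction l generalizing d with
  | nil => simp
  | cons q l ih =>
      by_cases h : p1 > q.1
      · rw [List.foldl_cons, if_pos h, ih, PySem.Dict.getD_insert_self, List.map_cons,
          List.sum_cons, if_pos (show q.1 < p1 from h)]
        ring
      · rw [List.foldl_cons, if_neg h, ih, List.map_cons, List.sum_cons,
          if_neg (show ¬ q.1 < p1 from h)]
        ring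

theorem pvOuter_getD (la lb : List (Int × Int)) (d : PySem.Dict String Int) :
    ((la.foldl (fun d p =>
        lb.foldl (fun d q => if p.1 > q.1 then d.insert "win" (d.getD "win" 0 + q.2 * p.2) else d) d) d).getD "win" 0)
      = d.getD "win" 0
        + (la.map (fun p => (lb.map (fun q => if q.1 < p.1 then q.2 * p.2 else 0)).sum)).sum := by
  induction la generalizing d with
  | nil => simp
  | cons p la ih =>
      simp only [List.foldl_cons, ih, pvInner_getD, List.map_cons, List.sum_cons]
      ring

theorem pvCompareCount_win (as bs : List Int) :
    (pvCompareCount (PySem.Dict.counter as) (PySem.Dict.counter bs)).getD "win" 0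
      = pvPair as bs := by
  unfold pvCompareCount
  rw [pvOuter_getD, PySem.Dict.items_counter, PySem.Dict.items_counter]
  have hinner : ∀ ka ca : Int,
      (((PySem.Set.ofList bs).map (fun k => (k, (bs.count k : Int)))).map
          (fun q => if q.1 < ka then q.2 * ca else 0)).sum
        = (bs.countP (fun b => decide (b < ka)) : Int) * ca := by
    intro ka ca
    rw [List.map_map]
    have h1 : ((PySem.Set.ofList bs).map
        (fun k => (bs.count k : Int) * (if k < ka then ca else 0))).sum
        = (bs.map (fun k => if k < ka then ca else 0)).sum :=
      pvSum_count_mul bs (PySem.Set.ofList bs) _ (PySem.Set.nodup_ofList bs)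
        (fun b hb => (PySem.Set.mem_ofList _ _).mpr hb)
    have h2 : ((PySem.Set.ofList bs).map
        ((fun q : Int × Int => if q.1 < ka then q.2 * ca else 0) ∘ (fun k => (k, (bs.count k : Int))))).sum
        = ((PySem.Set.ofList bs).map
        (fun k => (bs.count k : Int) * (if k < ka then ca else 0))).sum := by
      refine congrArg List.sum (List.map_congr_left ?_)
      intro k _
      by_cases h : k < ka <;> simp [Function.comp, h, mul_comm]
    rw [h2, h1, pvSum_ite_count]
  calc (PySem.Dict.empty.getD "win" 0)
        + (((PySem.Set.ofList as).map (fun k => (k, (as.count k : Int)))).map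
            (fun p => (((PySem.Set.ofList bs).map (fun k => (k, (bs.count k : Int)))).map
              (fun q => if q.1 < p.1 then q.2 * p.2 else 0)).sum)).sum
      = (((PySem.Set.ofList as).map (fun k => (k, (as.count k : Int)))).map
            (fun p => (bs.countP (fun b => decide (b < p.1)) : Int) * p.2)).sum := by
        rw [show (PySem.Dict.empty : PySem.Dict String Int).getD "win" 0 = 0 from rfl, zero_add]
        refine congrArg List.sum (List.map_congr_left ?_)
        intro p _
        exact hinner p.1 p.2
    _ = ((PySem.Set.ofList as).map
          (fun k => (as.count k : Int) * (bs.countP (fun b => decide (b < k)) : Int))).sum := by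
        rw [List.map_map]
        refine congrArg List.sum (List.map_congr_left ?_)
        intro k _
        simp [Function.comp, mul_comm]
    _ = (as.map (fun a => (bs.countP (fun b => decide (b < a)) : Int))).sum :=
        pvSum_count_mul as (PySem.Set.ofList as) _ (PySem.Set.nodup_ofList as)
          (fun b hb => (PySem.Set.mem_ofList _ _).mpr hb)
    _ = pvPair as bs := rfl

-- ---------- pvPair basics ----------

theorem pvPair_perm {as as' bs bs' : List Int} (ha : as.Perm as') (hb : bs.Perm bs') :
    pvPair as bs = pvPair as' bs' := by
  unfold pvPair
  have h1 : ∀ a : Int, (bs.countP (fun b => decide (b < a)) : Int)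
      = (bs'.countP (fun b => decide (b < a)) : Int) := fun a => by rw [hb.countP_eq]
  rw [List.map_congr_left (fun a _ => h1 a)]
  exact (ha.map _).sum_eq

theorem pvPair_nonneg (as bs : List Int) : 0 ≤ pvPair as bs := by
  unfold pvPair
  apply List.sum_nonneg
  intro x hx
  rcases List.mem_map.mp hx with ⟨a, _, rfl⟩
  positivity

-- ---------- the two-pointer count ----------

theorem pvSorted_lt_iff (bs : List Int) (hp : bs.Pairwise (· ≤ ·)) (a : Int) :
    ∀ i (h : i < bs.length), (bs[i] < a ↔ i < bs.countP (fun b => decide (b < a))) := by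
  induction bs with
  | nil => intro i h; cases h
  | cons x t ih =>
      have hx : ∀ y ∈ t, x ≤ y := fun y hy => (List.pairwise_cons.mp hp).1 y hy
      have ht : t.Pairwise (· ≤ ·) := (List.pairwise_cons.mp hp).2
      intro i h
      by_cases hxa : x < a
      · have hc : (x :: t).countP (fun b => decide (b < a))
            = t.countP (fun b => decide (b < a)) + 1 := by
          simp [hxa]
        cases i with
        | zero => simpa [hc] using hxa
        | succ n =>
            have hn : n < t.length := by simpa using h
            have := ih ht n hn
            simpa [hc, Nat.succ_lt_succ_iff] using this
      · have hzero : t.countP (fun b => decide (b < a)) = 0 := by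
          apply List.countP_eq_zero.mpr
          intro y hy
          simp only [decide_eq_true_eq]
          exact fun hya => hxa (lt_of_le_of_lt (hx y hy) hya)
        have hc : (x :: t).countP (fun b => decide (b < a)) = 0 := by
          simp [hxa, hzero]
        rw [hc]
        cases i with
        | zero => simpa using hxa
        | succ n =>
            have hn : n < t.length := by simpa using h
            simp only [List.getElem_cons_succ]
            constructor
            · intro hlt
              exact absurd hlt (by
                have := hx _ (List.getElem_mem hn)
                exact fun hlt => hxa (lt_of_le_of_lt this hlt))
            · intro hlt; cases hlt
  
theorem pvAdvance_eq (bs : List Int) (hp : bs.Pairwise (· ≤ ·)) (a : Int) :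
    ∀ j, j ≤ bs.countP (fun b => decide (b < a)) →
      pvAdvance bs a j = bs.countP (fun b => decide (b < a)) := by
  intro j hj
  induction hn : bs.length - j using Nat.strong_induction_on generalizing j with
  | _ n ih =>
      unfold pvAdvance
      by_cases h : j < bs.length
      · rw [dif_pos h]
        by_cases hlt : bs[j] < a
        · rw [if_pos hlt]
          have hjc : j < bs.countP (fun b => decide (b < a)) :=
            (pvSorted_lt_iff bs hp a j h).mp hlt
          exact ih (bs.length - (j + 1)) (by omega) (j + 1) hjc rfl
        · rw [if_neg hlt]
          have := (pvSorted_lt_iff bs hp a j h).not.mp hlt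
          omega
      · rw [dif_neg h]
        have hle : bs.countP (fun b => decide (b < a)) ≤ bs.length := List.countP_le_length
        omega

theorem pvCountWins_fold (bS : List Int) (hpb : bS.Pairwise (· ≤ ·)) :
    ∀ (aS : List Int), aS.Pairwise (· ≤ ·) →
      ∀ (w : Int) (j : Nat), (∀ x ∈ aS, j ≤ bS.countP (fun b => decide (b < x))) →
        (aS.foldl (fun (st : Int × Nat) a =>
            let j := pvAdvance bS a st.2
            (st.1 + (j : Int), j)) (w, j)).1
          = w + pvPair aS bS := by
  intro aS
  induction aS with
  | nil => intro _ w j _; simp [pvPair]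
  | cons a t ih =>
      intro hap w j hj
      have hat : ∀ y ∈ t, a ≤ y := fun y hy => (List.pairwise_cons.mp hap).1 y hy
      have htp : t.Pairwise (· ≤ ·) := (List.pairwise_cons.mp hap).2
      have hadv : pvAdvance bS a j = bS.countP (fun b => decide (b < a)) :=
        pvAdvance_eq bS hpb a j (hj a List.mem_cons_self)
      simp only [List.foldl_cons, hadv]
      rw [ih htp _ _ (fun x hx => List.countP_mono_left
        (fun b _ hb => by
          simp only [decide_eq_true_eq] at hb ⊢
          exact lt_of_lt_of_le hb (hat x hx)))]
      simp [pvPair, List.map_cons]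
      ring

theorem pvCountWins_eq (as bs : List Int) :
    pvCountWins (PySem.List.sorted as (fun x => x) false) (PySem.List.sorted bs (fun x => x) false)
      = pvPair as bs := by
  unfold pvCountWins
  set aS := PySem.List.sorted as (fun x => x) false with haS
  set bS := PySem.List.sorted bs (fun x => x) false with hbS
  have hpa : aS.Pairwise (· ≤ ·) := PySem.List.sorted_pairwise as (fun x => x)
  have hpb : bS.Pairwise (· ≤ ·) := PySem.List.sorted_pairwise bs (fun x => x)
  rw [pvCountWins_fold bS hpb aS hpa 0 0 (fun x _ => Nat.zero_le _), zero_add]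
  exact pvPair_perm (PySem.List.sorted_perm as (fun x => x) false)
    (PySem.List.sorted_perm bs (fun x => x) false)

-- ---------- per-combination win values agree ----------

theorem pvWin_eq (dice : List (List Int)) (aD bD : List Int) :
    (pvSelectNumber dice aD bD).2.getD "win" 0
      = pvCountWins (PySem.List.sorted (pvSums dice aD) (fun x => x) false)
          (PySem.List.sorted (pvSums dice bD) (fun x => x) false) := by
  unfold pvSelectNumber
  simp only [PySem.List.foldl_append_singleton_eq_map, List.nil_append]
  rw [pvCompareCount_win, pvCountWins_eq]
  have h : ∀ (idxs : List Int),
      ((PySem.List.sorted ((pvListProduct (idxs.map (fun i => PySem.List.pyGetD dice i []))).map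
          List.sum) (fun x => x) true)).Perm (pvSums dice idxs) := by
    intro idxs
    have hperm : ((pvListProduct (idxs.map (fun i => PySem.List.pyGetD dice i []))).map List.sum).Perm
        (pvSums dice idxs) := by
      rw [pvProduct_sum, pvSums_eq]
    exact (PySem.List.sorted_perm _ _ true).trans hperm
  exact pvPair_perm (h aD) (h bD)

-- ---------- the selection folds agree ----------

theorem pvFold_eq (W : List Int → Int) :
    ∀ (cs : List (List Int)) (s : List Int × Int), (∀ c ∈ cs, c ≠ []) → s.1 ≠ [] →
      (cs.foldl (fun st c => if st.1 = [] then (c, W c) else if st.2 < W c then (c, W c) else st) s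
        = cs.foldl (fun st c => if st.2 < W c then (c, W c) else st) s)
      ∧ (cs.foldl (fun st c => if st.2 < W c then (c, W c) else st) s).1 ≠ [] := by
  intro cs
  induction cs with
  | nil => intro s _ hs; exact ⟨rfl, hs⟩
  | cons c cs ih =>
      intro s hcs hs
      have hc : c ≠ [] := hcs c List.mem_cons_self
      have hcs' : ∀ x ∈ cs, x ≠ [] := fun x hx => hcs x (List.mem_cons_of_mem _ hx)
      simp only [List.foldl_cons, if_neg hs]
      by_cases h : s.2 < W c
      · rw [if_pos h]
        exact ih (c, W c) hcs' hc
      · rw [if_neg h]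
        exact ih s hcs' hs

theorem pvFolds_agree (W : List Int → Int) (hW : ∀ c, 0 ≤ W c) (cs : List (List Int))
    (hcs : ∀ c ∈ cs, c ≠ []) (hne : cs ≠ []) :
    (cs.foldl (fun st c => if st.1 = [] then (c, W c) else if st.2 < W c then (c, W c) else st)
        ([], 0)).1
      = (cs.foldl (fun st c => if st.2 < W c then (c, W c) else st) ([], (-1 : Int))).1 := by
  cases cs with
  | nil => exact absurd rfl hne
  | cons c0 rest =>
      have hc0 : c0 ≠ [] := hcs c0 List.mem_cons_self
      have hrest : ∀ c ∈ rest, c ≠ [] := fun c hc => hcs c (List.mem_cons_of_mem _ hc)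
      simp only [List.foldl_cons, if_true,
        if_pos (show (-1 : Int) < W c0 from lt_of_lt_of_le neg_one_lt_zero (hW c0))]
      rw [(pvFold_eq W rest (c0, W c0) hrest hc0).1]

-- combinations of a nonempty enough list is nonempty
theorem pvCombi_ne_nil (xs : List Int) (r : Nat) (hr : r ≤ xs.length) :
    PySem.List.combinations xs r ≠ [] := by
  intro h
  have : xs.take r ∈ PySem.List.combinations xs r :=
    (PySem.List.mem_combinations_iff xs r (xs.take r)).mpr
      ⟨List.take_sublist r xs, by simpa using hr⟩
  rw [h] at this
  cases this

theorem pvMain (dice : List (List Int)) : solution dice = solution_alt dice := by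
  unfold solution solution_alt
  have hsel1 : ∀ (a b : List Int), (pvSelectNumber dice a b).1 = a := fun a b => rfl
  simp only [hsel1, pvWin_eq]
  have hW : ∀ c : List Int, 0 ≤ pvCountWins (PySem.List.sorted (pvSums dice c) (fun x => x) false)
      (PySem.List.sorted (pvSums dice ((PySem.List.pyRange 0 (dice.length : Int) 1).filter
        (fun i => !c.contains i))) (fun x => x) false) := by
    intro c
    rw [pvCountWins_eq]
    exact pvPair_nonneg _ _
  by_cases hk : dice.length / 2 = 0
  · rw [hk, PySem.List.combinations_zero]
    simp only [List.foldl_cons, List.foldl_nil]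
    split_ifs <;> rfl
  · have hne : PySem.List.combinations (PySem.List.pyRange 0 (dice.length : Int) 1)
        (dice.length / 2) ≠ [] := by
      apply pvCombi_ne_nil
      rw [PySem.List.length_pyRange_one]
      have := Nat.div_le_self dice.length 2
      omega
    have hcs : ∀ c ∈ PySem.List.combinations (PySem.List.pyRange 0 (dice.length : Int) 1)
        (dice.length / 2), c ≠ [] := by
      intro c hc hcnil
      have hlen : c.length = dice.length / 2 :=
        ((PySem.List.mem_combinations_iff _ _ _).mp hc).2
      rw [hcnil] at hlen
      simp at hlen
      exact hk hlen.symm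
    exact congrArg (List.map (fun x => x + 1))
      (pvFolds_agree _ hW _ hcs hne)

-- ===== VERDICT (by name: the statement is the Claim_ definition above) =====
theorem solution_spec : Claim_equal_solution := by
  intro dice _
  exact pvMain dice
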